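-- pv_equiv track=rewrite | github.com/pypi-data/pypi-mirror-401 | packages/codelogician/codelogician-2.0.0b8.tar.gz/codelogician-2.0.0b8/src/codelogician/doc/utils/docs.py | get_lines_by_char_range
-- ===== SOURCE A (Python) =====
-- def get_lines_by_char_range(text: str, start_char_index: int, end_char_index: int):
--     """
--     Retrieves all lines from a given text that contain characters within
--     the specified start and end character indexes.
--
--     Args:
--         text (str): The input text.
--         start_char_index (int): The starting character index (inclusive).
--         end_char_index (int): The ending character index (exclusive).
--
--     Returns:
--         list: A list of lines that contain characters within the specified range.
--     """
--
--     # Keep line endings for accurate indexing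
--     lines = text.splitlines(keepends=True)
--
--     result_lines = []
--     current_char_offset = 0
--
--     for line in lines:
--         line_start_char = current_char_offset
--         line_end_char = current_char_offset + len(line)
--
--         # Check for overlap between the requested range and the line's range
--         if max(start_char_index, line_start_char) < min(
--             end_char_index, line_end_char
--         ):
--             result_lines.append(line.strip('\n'))  # Remove newline for clean output
--
--         current_char_offset += len(line)
--
--     return '\n'.join(result_lines)
-- ===== SOURCE B (Python) =====
-- import bisect
--
--
-- def get_lines_by_char_range(text, start_char_index, end_char_index):
--     lines = text.splitlines(keepends=True)
--     offsets = [0]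
--     for line in lines:
--         offsets.append(offsets[-1] + len(line))
--     total = offsets[-1]
--     lo = max(start_char_index, 0)
--     hi = min(end_char_index, total)
--     if lo >= hi:
--         return ''
--     first = bisect.bisect_right(offsets, lo) - 1
--     last = bisect.bisect_left(offsets, hi)
--     return '\n'.join(line.strip('\n') for line in lines[first:last])
-- ===== Notes on version B (the rewrite author's own statement) =====
-- stated objective: alternative
-- what changed: Replaces the single offset-accumulating scan that tests every line for overlap with a prefix-offset array plus two bisect searches that locate the contiguous block of overlapping lines, which is then sliced, stripped and joined.
import Mathlib
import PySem

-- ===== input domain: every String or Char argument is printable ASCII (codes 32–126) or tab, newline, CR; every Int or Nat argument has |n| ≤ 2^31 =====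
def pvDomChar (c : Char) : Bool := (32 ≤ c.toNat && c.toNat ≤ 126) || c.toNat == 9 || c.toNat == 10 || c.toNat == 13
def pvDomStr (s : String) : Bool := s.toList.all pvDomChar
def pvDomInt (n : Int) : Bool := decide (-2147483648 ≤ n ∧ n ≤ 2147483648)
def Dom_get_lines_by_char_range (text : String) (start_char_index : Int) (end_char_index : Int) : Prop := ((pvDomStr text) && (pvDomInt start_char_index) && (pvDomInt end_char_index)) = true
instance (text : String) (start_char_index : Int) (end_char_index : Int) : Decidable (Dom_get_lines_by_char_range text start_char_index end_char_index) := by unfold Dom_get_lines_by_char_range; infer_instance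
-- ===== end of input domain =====

-- B replaces A's offset-accumulating overlap scan by a prefix-offset array plus two bisect
-- searches that locate the contiguous block of overlapping lines (objective: alternative).

-- shared helper: str.splitlines(keepends=True), ported by hand; exact on Dom, where the only
-- line-break characters are '\n', '\r' and the pair "\r\n"
def pvSplitKeepGo : List Char → List Char → List (List Char)
  | [], acc => if acc.isEmpty then [] else [acc.reverse]
  | c :: rest, acc =>
    if c = '\n' then (acc.reverse ++ ['\n']) :: pvSplitKeepGo rest []
    else if c = '\r' then
      (acc.reverse ++ '\r' :: (if rest.head? = some '\n' then ['\n'] else [])) ::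
        pvSplitKeepGo (if rest.head? = some '\n' then rest.tail else rest) []
    else pvSplitKeepGo rest (c :: acc)
termination_by cs _ => cs.length
decreasing_by all_goals first
  | (split <;> simp [List.length_tail])
  | simp

def pvSplitKeep (cs : List Char) : List (List Char) := pvSplitKeepGo cs []

-- shared helper: line.strip('\n')
def pvStrip (l : List Char) : List Char := PySem.Chars.stripChars l ['\n']

-- ===== PORT A =====
def get_lines_by_char_range (text : String) (start_char_index : Int) (end_char_index : Int) : String :=
  let lines := pvSplitKeep text.toList
  let r := lines.foldl (fun st line =>
      let line_start_char := st.2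
      let line_end_char := st.2 + (line.length : Int)
      ((if max start_char_index line_start_char < min end_char_index line_end_char
        then st.1 ++ [pvStrip line] else st.1), st.2 + (line.length : Int)))
    (([] : List (List Char)), (0 : Int))
  String.ofList (PySem.Chars.join ['\n'] r.1)

-- ===== PORT B =====
def get_lines_by_char_range_alt (text : String) (start_char_index : Int) (end_char_index : Int) : String :=
  let lines := pvSplitKeep text.toList
  let offsets := lines.foldl (fun acc line => acc ++ [acc.getLastD 0 + (line.length : Int)]) [(0 : Int)]
  let total := offsets.getLastD 0
  let lo := max start_char_index 0
  let hi := min end_char_index total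
  if lo ≥ hi then "" else
    let first := PySem.List.bisectRight offsets lo - 1
    let last := PySem.List.bisectLeft offsets hi
    String.ofList (PySem.Chars.join ['\n']
      ((PySem.List.slice lines (some (first : Int)) (some (last : Int))).map pvStrip))

-- ===== PRECONDITION & SPEC =====
def Spec_get_lines_by_char_range (text : String) (start_char_index : Int) (end_char_index : Int) (out : String) : Prop := out = get_lines_by_char_range_alt text start_char_index end_char_index
instance (text : String) (start_char_index : Int) (end_char_index : Int) (out : String) : Decidable (Spec_get_lines_by_char_range text start_char_index end_char_index out) := by unfold Spec_get_lines_by_char_range; infer_instance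

-- ===== CLAIM (what is proved, stated in full; the proofs are below) =====
def Claim_equal_get_lines_by_char_range : Prop := ∀ (text : String) (start_char_index : Int) (end_char_index : Int), Dom_get_lines_by_char_range text start_char_index end_char_index → Spec_get_lines_by_char_range text start_char_index end_char_index (get_lines_by_char_range text start_char_index end_char_index)

-- ===== LEMMAS AND PROOFS =====

-- the list of lines A selects, starting at character offset `off`
def pvSelect (s e : Int) : List (List Char) → Int → List (List Char)
  | [], _ => []
  | l :: t, off =>
    (if max s off < min e (off + (l.length : Int)) then [pvStrip l] else []) ++
      pvSelect s e t (off + (l.length : Int))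

-- B's offsets list: off, then the cumulative end offsets of the lines
def pvOfs : List (List Char) → Int → List Int
  | [], off => [off]
  | l :: t, off => off :: pvOfs t (off + (l.length : Int))

def pvSumLen (L : List (List Char)) : Int := ((L.map List.length).sum : Nat)

-- number of leading lines ending at or before lo / starting before hi
def pvSkipCount (lo : Int) : List (List Char) → Int → Nat
  | [], _ => 0
  | l :: t, off => if off + (l.length : Int) ≤ lo then pvSkipCount lo t (off + (l.length : Int)) + 1 else 0

def pvTakeCount (hi : Int) : List (List Char) → Int → Nat
  | [], _ => 0
  | l :: t, off => if off < hi then pvTakeCount hi t (off + (l.length : Int)) + 1 else 0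

theorem pvSumLen_nil : pvSumLen [] = 0 := rfl

theorem pvSumLen_cons (l : List Char) (t : List (List Char)) :
    pvSumLen (l :: t) = (l.length : Int) + pvSumLen t := by
  simp [pvSumLen]

theorem pvSumLen_nonneg (L : List (List Char)) : 0 ≤ pvSumLen L :=
  Int.natCast_nonneg _

theorem pvSplitKeepGo_ne_nil (cs acc : List Char) : ∀ l ∈ pvSplitKeepGo cs acc, l ≠ [] := by
  fun_induction pvSplitKeepGo cs acc <;> intro l hl <;>
    simp_all [List.isEmpty_iff] <;> rcases hl with rfl | h <;> simp_all

theorem pvOfs_length (L : List (List Char)) (off : Int) : (pvOfs L off).length = L.length + 1 := by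
  induction L generalizing off with
  | nil => simp [pvOfs]
  | cons l t ih => simp [pvOfs, ih]

theorem pvOfs_le (L : List (List Char)) (off : Int) : ∀ x ∈ pvOfs L off, off ≤ x := by
  induction L generalizing off with
  | nil => simp [pvOfs]
  | cons l t ih =>
    intro x hx
    simp [pvOfs] at hx
    rcases hx with h | h
    · omega
    · have := ih (off + (l.length : Int)) x h; omega

theorem pvOfs_pairwise (L : List (List Char)) (off : Int) :
    (pvOfs L off).Pairwise (· ≤ ·) := by
  induction L generalizing off with
  | nil => simp [pvOfs]
  | cons l t ih =>
    refine List.pairwise_cons.2 ⟨?_, ih _⟩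
    intro x hx
    have := pvOfs_le t (off + (l.length : Int)) x hx
    omega

theorem pvOfs_getLastD (L : List (List Char)) (off : Int) (d : Int) :
    (pvOfs L off).getLastD d = off + pvSumLen L := by
  induction L generalizing off d with
  | nil => simp [pvOfs, pvSumLen]
  | cons l t ih =>
    simp only [pvOfs, List.getLastD_cons, ih, pvSumLen_cons]
    ring

theorem pvFoldB (L : List (List Char)) (pre : List Int) (hpre : pre ≠ []) :
    L.foldl (fun acc line => acc ++ [acc.getLastD 0 + (line.length : Int)]) pre
      = pre.dropLast ++ pvOfs L (pre.getLastD 0) := by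
  induction L generalizing pre with
  | nil =>
    simp only [List.foldl_nil, pvOfs]
    rcases List.eq_nil_or_concat pre with rfl | ⟨ys, y, rfl⟩
    · exact absurd rfl hpre
    · simp
  | cons l t ih =>
    simp only [List.foldl_cons]
    rw [ih (pre ++ [pre.getLastD 0 + (l.length : Int)]) (by simp)]
    rcases List.eq_nil_or_concat pre with rfl | ⟨ys, y, rfl⟩
    · exact absurd rfl hpre
    · simp [pvOfs]

theorem pvFoldA (s e : Int) (L : List (List Char)) (acc : List (List Char)) (off : Int) :
    (L.foldl (fun st line =>
      let line_start_char := st.2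
      let line_end_char := st.2 + (line.length : Int)
      ((if max s line_start_char < min e line_end_char
        then st.1 ++ [pvStrip line] else st.1), st.2 + (line.length : Int))) (acc, off)).1
      = acc ++ pvSelect s e L off := by
  induction L generalizing acc off with
  | nil => simp [pvSelect]
  | cons l t ih =>
    simp only [List.foldl_cons, pvSelect]
    rw [ih]
    split <;> simp

theorem pvSelect_empty0 (s e T : Int) (L : List (List Char)) (off : Int)
    (h0 : 0 ≤ off) (hinv : off + pvSumLen L = T) (hle : min e T ≤ max s 0) :
    pvSelect s e L off = [] := by
  induction L generalizing off with
  | nil => rfl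
  | cons l t ih =>
    have hs := pvSumLen_nonneg t
    rw [pvSumLen_cons] at hinv
    simp only [pvSelect]
    rw [if_neg (by omega), List.nil_append]
    exact ih _ (by omega) (by omega)

theorem pvSelect_empty2 (s e T : Int) (L : List (List Char)) (off : Int)
    (hne : ∀ l ∈ L, l ≠ []) (hhi : min e T ≤ off) (hinv : off + pvSumLen L = T) :
    pvSelect s e L off = [] := by
  induction L generalizing off with
  | nil => rfl
  | cons l t ih =>
    have hs := pvSumLen_nonneg t
    have hn : 1 ≤ (l.length : Int) := by
      have := hne l (by simp)
      have : l.length ≠ 0 := by simpa [List.length_eq_zero_iff] using this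
      omega
    rw [pvSumLen_cons] at hinv
    simp only [pvSelect]
    rw [if_neg (by omega), List.nil_append]
    exact ih _ (fun x hx => hne x (List.mem_cons_of_mem _ hx)) (by omega) (by omega)

theorem pvSelect_phase2 (s e T : Int) (L : List (List Char)) (off : Int)
    (hne : ∀ l ∈ L, l ≠ []) (hlo : max s 0 < off) (hinv : off + pvSumLen L = T) :
    pvSelect s e L off = (L.take (pvTakeCount (min e T) L off)).map pvStrip := by
  induction L generalizing off with
  | nil => rfl
  | cons l t ih =>
    have hs := pvSumLen_nonneg t
    have hn : 1 ≤ (l.length : Int) := by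
      have := hne l (by simp)
      have : l.length ≠ 0 := by simpa [List.length_eq_zero_iff] using this
      omega
    rw [pvSumLen_cons] at hinv
    have hne' : ∀ x ∈ t, x ≠ [] := fun x hx => hne x (List.mem_cons_of_mem _ hx)
    by_cases hoe : off < min e T
    · have htc : pvTakeCount (min e T) (l :: t) off
          = pvTakeCount (min e T) t (off + (l.length : Int)) + 1 := by
        simp only [pvTakeCount]; rw [if_pos (by omega)]
      rw [htc]
      simp only [pvSelect]
      rw [if_pos (by omega), List.take_succ_cons, List.map_cons, List.singleton_append,
        ih (off + (l.length : Int)) hne' (by omega) (by omega)]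
    · have htc : pvTakeCount (min e T) (l :: t) off = 0 := by
        simp only [pvTakeCount]; rw [if_neg (by omega)]
      rw [htc]
      simp only [pvSelect]
      rw [if_neg (by omega), List.nil_append, List.take_zero, List.map_nil]
      exact pvSelect_empty2 s e T t (off + (l.length : Int)) hne' (by omega) (by omega)

theorem pvSelect_phase1 (s e T : Int) (L : List (List Char)) (off : Int)
    (hne : ∀ l ∈ L, l ≠ []) (h0 : 0 ≤ off) (hoff : off ≤ max s 0)
    (hlt : max s 0 < min e T) (hinv : off + pvSumLen L = T) :
    pvSelect s e L off
      = (List.take (pvTakeCount (min e T) L off - pvSkipCount (max s 0) L off)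
          (List.drop (pvSkipCount (max s 0) L off) L)).map pvStrip := by
  induction L generalizing off with
  | nil => rfl
  | cons l t ih =>
    have hs := pvSumLen_nonneg t
    have hn : 1 ≤ (l.length : Int) := by
      have := hne l (by simp)
      have : l.length ≠ 0 := by simpa [List.length_eq_zero_iff] using this
      omega
    rw [pvSumLen_cons] at hinv
    have hne' : ∀ x ∈ t, x ≠ [] := fun x hx => hne x (List.mem_cons_of_mem _ hx)
    have htc : pvTakeCount (min e T) (l :: t) off
        = pvTakeCount (min e T) t (off + (l.length : Int)) + 1 := by
      simp only [pvTakeCount]; rw [if_pos (by omega)]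
    by_cases hskip : off + (l.length : Int) ≤ max s 0
    · -- line ends at or before lo: skipped
      have hsc : pvSkipCount (max s 0) (l :: t) off
          = pvSkipCount (max s 0) t (off + (l.length : Int)) + 1 := by
        simp only [pvSkipCount]; rw [if_pos (by omega)]
      rw [htc, hsc, Nat.add_sub_add_right, List.drop_succ_cons]
      simp only [pvSelect]
      rw [if_neg (by omega), List.nil_append]
      exact ih (off + (l.length : Int)) hne' (by omega) (by omega) (by omega)
    · -- first overlapping line: selected, phase 2 takes over
      have hsc : pvSkipCount (max s 0) (l :: t) off = 0 := by
        simp only [pvSkipCount]; rw [if_neg (by omega)]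
      rw [htc, hsc, Nat.sub_zero, List.drop_zero, List.take_succ_cons, List.map_cons]
      simp only [pvSelect]
      rw [if_pos (by omega), List.singleton_append,
        pvSelect_phase2 s e T t (off + (l.length : Int)) hne' (by omega) (by omega)]

theorem pvSkipCount_le (lo : Int) (L : List (List Char)) (off : Int) :
    pvSkipCount lo L off ≤ L.length := by
  induction L generalizing off with
  | nil => simp [pvSkipCount]
  | cons l t ih => simp only [pvSkipCount]; split <;> simp [ih]

theorem pvTakeCount_le (hi : Int) (L : List (List Char)) (off : Int) :
    pvTakeCount hi L off ≤ L.length := by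
  induction L generalizing off with
  | nil => simp [pvTakeCount]
  | cons l t ih => simp only [pvTakeCount]; split <;> simp [ih]

theorem pvTakeCount_bracket (hi : Int) (L : List (List Char)) (off : Int)
    (hT : hi ≤ off + pvSumLen L) (j : Nat) (hj : j < (pvOfs L off).length) :
    (j < pvTakeCount hi L off → (pvOfs L off)[j] < hi)
      ∧ (pvTakeCount hi L off ≤ j → hi ≤ (pvOfs L off)[j]) := by
  induction L generalizing off j with
  | nil =>
    simp only [pvOfs, List.length_singleton] at hj
    interval_cases j
    simp only [pvTakeCount, pvOfs, List.getElem_singleton]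
    rw [pvSumLen_nil] at hT
    exact ⟨fun h => absurd h (by omega), fun _ => by omega⟩
  | cons l t ih =>
    rw [pvSumLen_cons] at hT
    by_cases hlt : off < hi
    · have htc : pvTakeCount hi (l :: t) off = pvTakeCount hi t (off + (l.length : Int)) + 1 := by
        simp only [pvTakeCount]; rw [if_pos hlt]
      cases j with
      | zero => exact ⟨fun _ => by simpa [pvOfs] using hlt, fun h => by rw [htc] at h; omega⟩
      | succ j' =>
        have hj' : j' < (pvOfs t (off + (l.length : Int))).length := by
          simpa [pvOfs] using hj
        have := ih (off + (l.length : Int)) (by omega) j' hj'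
        rw [htc]
        exact ⟨fun h => by simpa [pvOfs] using this.1 (by omega),
               fun h => by simpa [pvOfs] using this.2 (by omega)⟩
    · have htc : pvTakeCount hi (l :: t) off = 0 := by
        simp only [pvTakeCount]; rw [if_neg hlt]
      rw [htc]
      refine ⟨fun h => absurd h (by omega), fun _ => ?_⟩
      have hmem : (pvOfs (l :: t) off)[j] ∈ pvOfs (l :: t) off := List.getElem_mem hj
      have := pvOfs_le (l :: t) off _ hmem
      omega

theorem pvSkipCount_bracket (lo : Int) (L : List (List Char)) (off : Int)
    (hoff : off ≤ lo) (j : Nat) (hj : j < (pvOfs L off).length) :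
    (j < pvSkipCount lo L off + 1 → (pvOfs L off)[j] ≤ lo)
      ∧ (pvSkipCount lo L off + 1 ≤ j → lo < (pvOfs L off)[j]) := by
  induction L generalizing off j with
  | nil =>
    simp only [pvOfs, List.length_singleton] at hj
    interval_cases j
    simp only [pvSkipCount, pvOfs, List.getElem_singleton]
    exact ⟨fun _ => hoff, fun h => absurd h (by omega)⟩
  | cons l t ih =>
    by_cases hsk : off + (l.length : Int) ≤ lo
    · have hsc : pvSkipCount lo (l :: t) off = pvSkipCount lo t (off + (l.length : Int)) + 1 := by
        simp only [pvSkipCount]; rw [if_pos hsk]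
      cases j with
      | zero => exact ⟨fun _ => by simpa [pvOfs] using hoff, fun h => by rw [hsc] at h; omega⟩
      | succ j' =>
        have hj' : j' < (pvOfs t (off + (l.length : Int))).length := by
          simpa [pvOfs] using hj
        have := ih (off + (l.length : Int)) hsk j' hj'
        rw [hsc]
        exact ⟨fun h => by simpa [pvOfs] using this.1 (by omega),
               fun h => by simpa [pvOfs] using this.2 (by omega)⟩
    · have hsc : pvSkipCount lo (l :: t) off = 0 := by
        simp only [pvSkipCount]; rw [if_neg hsk]
      rw [hsc]
      cases j with
      | zero => exact ⟨fun _ => by simpa [pvOfs] using hoff, fun h => by omega⟩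
      | succ j' =>
        refine ⟨fun h => absurd h (by omega), fun _ => ?_⟩
        have hj' : j' < (pvOfs t (off + (l.length : Int))).length := by
          simpa [pvOfs] using hj
        have hmem : (pvOfs t (off + (l.length : Int)))[j'] ∈ pvOfs t (off + (l.length : Int)) :=
          List.getElem_mem hj'
        have := pvOfs_le t (off + (l.length : Int)) _ hmem
        simp only [pvOfs, List.getElem_cons_succ]
        omega

theorem pvSearchUnique (xs : List Int) (P Q : Int → Prop) (hPQ : ∀ y, P y → Q y → False)
    (r r' : Nat) (hr : r ≤ xs.length) (hr' : r' ≤ xs.length)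
    (h1 : ∀ j, (hj : j < xs.length) → j < r → P xs[j])
    (h2 : ∀ j, (hj : j < xs.length) → r ≤ j → Q xs[j])
    (h1' : ∀ j, (hj : j < xs.length) → j < r' → P xs[j])
    (h2' : ∀ j, (hj : j < xs.length) → r' ≤ j → Q xs[j]) : r = r' := by
  rcases Nat.lt_trichotomy r r' with h | h | h
  · exact absurd (h2 r (lt_of_lt_of_le h hr') le_rfl) (fun hq => hPQ _ (h1' r (lt_of_lt_of_le h hr') h) hq)
  · exact h
  · exact absurd (h2' r' (lt_of_lt_of_le h hr) le_rfl) (fun hq => hPQ _ (h1 r' (lt_of_lt_of_le h hr) h) hq)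

-- ===== VERDICT (by name: the statement is the Claim_ definition above) =====
theorem get_lines_by_char_range_spec : Claim_equal_get_lines_by_char_range := by
  intro text s e _hdom
  unfold Spec_get_lines_by_char_range
  simp only [get_lines_by_char_range, get_lines_by_char_range_alt]
  rw [pvFoldA, pvFoldB _ [0] (by simp)]
  set L := pvSplitKeep text.toList with hL
  have hne : ∀ l ∈ L, l ≠ [] := pvSplitKeepGo_ne_nil text.toList []
  simp only [show ([(0:Int)].dropLast) = [] from rfl, show ([(0:Int)].getLastD 0) = 0 from rfl,
    List.nil_append, pvOfs_getLastD, zero_add]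
  set T := pvSumLen L with hT
  by_cases hge : max s 0 ≥ min e T
  · rw [if_pos hge, pvSelect_empty0 s e T L 0 le_rfl (by omega) hge]
    rfl
  · rw [if_neg hge]
    have hlt : max s 0 < min e T := by omega
    set sc := pvSkipCount (max s 0) L 0 with hsc
    set tc := pvTakeCount (min e T) L 0 with htc
    have hlen := pvOfs_length L 0
    have hsorted := pvOfs_pairwise L 0
    obtain ⟨hbr1, hbr2, hbr3⟩ := PySem.List.bisectRight_spec (pvOfs L 0) (max s 0) hsorted
    obtain ⟨hbl1, hbl2, hbl3⟩ := PySem.List.bisectLeft_spec (pvOfs L 0) (min e T) hsorted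
    have hbrEq : PySem.List.bisectRight (pvOfs L 0) (max s 0) = sc + 1 := by
      refine pvSearchUnique (pvOfs L 0) (· ≤ max s 0) (fun y => max s 0 < y)
        (fun y h1 h2 => by omega) _ _ hbr1 ?_ hbr2 hbr3 ?_ ?_
      · have := pvSkipCount_le (max s 0) L 0; omega
      · intro j hj hjlt
        exact (pvSkipCount_bracket (max s 0) L 0 (by omega) j hj).1 hjlt
      · intro j hj hjge
        exact (pvSkipCount_bracket (max s 0) L 0 (by omega) j hj).2 hjge
    have hblEq : PySem.List.bisectLeft (pvOfs L 0) (min e T) = tc := by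
      refine pvSearchUnique (pvOfs L 0) (· < min e T) (fun y => min e T ≤ y)
        (fun y h1 h2 => by omega) _ _ hbl1 ?_ hbl2 hbl3 ?_ ?_
      · have := pvTakeCount_le (min e T) L 0; omega
      · intro j hj hjlt
        exact (pvTakeCount_bracket (min e T) L 0 (by omega) j hj).1 hjlt
      · intro j hj hjge
        exact (pvTakeCount_bracket (min e T) L 0 (by omega) j hj).2 hjge
    rw [hbrEq, hblEq, Nat.add_sub_cancel, PySem.List.slice_natCast,
      pvSelect_phase1 s e T L 0 hne le_rfl (by omega) hlt (by omega)]
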